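-- pv_equiv track=rewrite | github.com/Jennivine/ProgComp | 5 card trick/cards.py | coded_difference
-- ===== SOURCE A (Python) =====
-- def coded_difference(cards):
--     coded_map = { (1,2,3): 1, (1,3,2): 2, (2,1,3): 3,
--                   (2,3,1): 4, (3,1,2): 5, (3,2,1): 6 }
--     if len(cards) != 3: raise "Need three cards"
--     original = cards
--     sorted_  = sorted(cards)
--     indices  = [sorted_.index(x) + 1 for x in original]
--     return coded_map.get(tuple(indices))
-- ===== SOURCE B (Python) =====
-- def coded_difference(cards):
--     if len(cards) != 3: raise "Need three cards"
--     a, b, c = cards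
--     if a == b or a == c or b == c:
--         return None
--     return 2 * ((b < a) + (c < a)) + (c < b) + 1
-- ===== Notes on version B (the rewrite author's own statement) =====
-- stated objective: simpler
-- what changed: Replaces the sorted copy, the list.index comprehension and the 6-entry permutation table by a closed-form lexicographic rank computed from three pairwise comparisons (None kept for tied cards, as A returns).
import Mathlib
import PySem

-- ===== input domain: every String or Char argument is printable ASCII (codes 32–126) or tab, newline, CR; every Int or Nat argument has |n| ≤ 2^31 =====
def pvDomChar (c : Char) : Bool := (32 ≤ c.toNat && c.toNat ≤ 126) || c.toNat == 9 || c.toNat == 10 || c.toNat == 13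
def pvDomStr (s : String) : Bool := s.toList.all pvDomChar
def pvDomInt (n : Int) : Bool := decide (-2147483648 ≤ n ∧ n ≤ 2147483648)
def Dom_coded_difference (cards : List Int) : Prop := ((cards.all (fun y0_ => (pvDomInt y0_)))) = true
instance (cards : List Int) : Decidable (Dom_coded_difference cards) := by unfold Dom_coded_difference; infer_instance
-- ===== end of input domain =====

-- B drops the sorted copy, the index comprehension and the permutation table for a
-- closed-form rank from three pairwise comparisons (simpler; same None on tied cards).

-- ===== PORT A =====
-- Literal port of A.  The raise on len(cards) != 3 is excluded by Pre_; the port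
-- returns none there.  sorted_.index(x) always succeeds (x ∈ sorted_), so the
-- .getD 0 default is never used.
def coded_difference (cards : List Int) : Option Int :=
  let codedMap : PySem.Dict (List Int) Int :=
    PySem.Dict.mk [([1,2,3], 1), ([1,3,2], 2), ([2,1,3], 3),
                   ([2,3,1], 4), ([3,1,2], 5), ([3,2,1], 6)]
  if cards.length ≠ 3 then none
  else
    let original := cards
    let sorted_ := PySem.List.sorted cards (fun x => x) false
    let indices := original.map (fun x => (Int.ofNat ((PySem.List.index? sorted_ x).getD 0)) + 1)
    codedMap.get? indices

-- ===== PORT B =====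
def coded_difference_alt (cards : List Int) : Option Int :=
  match cards with
  | [a, b, c] =>
    if a = b ∨ a = c ∨ b = c then none
    else some (2 * ((if b < a then 1 else 0) + (if c < a then 1 else 0))
               + (if c < b then 1 else 0) + 1)
  | _ => none

-- ===== PRECONDITION & SPEC =====
-- Pre_ excludes exactly the inputs where A raises (len(cards) != 3).
def Pre_coded_difference (cards : List Int) : Prop := cards.length = 3
instance (cards : List Int) : Decidable (Pre_coded_difference cards) := by unfold Pre_coded_difference; infer_instance
def pvWitness_coded_difference : List Int := ([3, 1, 2])
def Spec_coded_difference (cards : List Int) (out : Option Int) : Prop := out = coded_difference_alt cards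
instance (cards : List Int) (out : Option Int) : Decidable (Spec_coded_difference cards out) := by unfold Spec_coded_difference; infer_instance

-- ===== CLAIM (what is proved, stated in full; the proofs are below) =====
def Claim_equal_coded_difference : Prop := ∀ (cards : List Int), Dom_coded_difference cards → Pre_coded_difference cards → Spec_coded_difference cards (coded_difference cards)

-- ===== LEMMAS AND PROOFS =====

-- ===== VERDICT (by name: the statement is the Claim_ definition above) =====
theorem coded_difference_spec : Claim_equal_coded_difference := by
  intro cards _ hpre
  obtain ⟨a, b, c, rfl⟩ : ∃ a b c, cards = [a, b, c] := by
    match cards, hpre with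
    | [a, b, c], _ => exact ⟨a, b, c, rfl⟩
  unfold Spec_coded_difference coded_difference coded_difference_alt
  rcases lt_trichotomy a b with h1 | h1 | h1 <;>
    rcases lt_trichotomy b c with h2 | h2 | h2 <;>
    rcases lt_trichotomy a c with h3 | h3 | h3 <;>
    simp_all [PySem.List.sorted, PySem.List.insertBy, PySem.List.index?, List.idxOf?,
              List.findIdx?_cons, List.find?_cons, PySem.Dict.get?, not_lt_of_gt,
              beq_iff_eq] <;>
    first
      | omega
      | (split_ifs <;> simp_all <;> omega)
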